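-- pv_equiv track=rewrite | github.com/strangem1n/Pystudy | 백준/Silver/17478. 재귀함수가 뭔가요？/재귀함수가 뭔가요？.py | f
-- ===== SOURCE A (Python) =====
-- def f(n):
--     if n == 0:
--         sentence1 = '"재귀함수가 뭔가요?"'
--         sentence2 = '"재귀함수는 자기 자신을 호출하는 함수라네"'
--         sentence3 = '라고 답변하였지.'
--         ans = [sentence1, sentence2, sentence3]
--         return ans
--
--     else:
--         sentence1 = '"재귀함수가 뭔가요?"'
--         sentence2 = '"잘 들어보게. 옛날옛날 한 산 꼭대기에 이세상 모든 지식을 통달한 선인이 있었어.'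
--         sentence3 = '마을 사람들은 모두 그 선인에게 수많은 질문을 했고, 모두 지혜롭게 대답해 주었지.'
--         sentence4 = '그의 답은 대부분 옳았다고 하네. 그런데 어느 날, 그 선인에게 한 선비가 찾아와서 물었어."'
--         ans = [sentence1, sentence2, sentence3, sentence4]
--         inner_sentence = f(n-1)
--         for s in inner_sentence:
--             s = '____' + s
--             ans.append(s)
--         sentence5 = '라고 답변하였지.'
--         ans.append(sentence5)
--         return ans
-- ===== SOURCE B (Python) =====
-- def f(n):
--     q = '"재귀함수가 뭔가요?"'
--     story = ['"잘 들어보게. 옛날옛날 한 산 꼭대기에 이세상 모든 지식을 통달한 선인이 있었어.',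
--              '마을 사람들은 모두 그 선인에게 수많은 질문을 했고, 모두 지혜롭게 대답해 주었지.',
--              '그의 답은 대부분 옳았다고 하네. 그런데 어느 날, 그 선인에게 한 선비가 찾아와서 물었어."']
--     base = '"재귀함수는 자기 자신을 호출하는 함수라네"'
--     closing = '라고 답변하였지.'
--     out = []
--     for d in range(n):
--         pad = '____' * d
--         out.append(pad + q)
--         for s in story:
--             out.append(pad + s)
--     pad = '____' * n
--     out += [pad + q, pad + base, pad + closing]
--     for d in range(n - 1, -1, -1):
--         out.append('____' * d + closing)
--     return out
-- ===== Notes on version B (the rewrite author's own statement) =====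
-- stated objective: faster
-- what changed: B replaces A's recursion (which re-prefixes '____' to every inner line at each of the n unwinding levels, copying each line up to n times) by a single iterative pass that emits opening lines for depths 0..n-1, the base-case lines at depth n, then closing lines for depths n-1..0, building each line exactly once from an indentation string computed once per depth.
import Mathlib
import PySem

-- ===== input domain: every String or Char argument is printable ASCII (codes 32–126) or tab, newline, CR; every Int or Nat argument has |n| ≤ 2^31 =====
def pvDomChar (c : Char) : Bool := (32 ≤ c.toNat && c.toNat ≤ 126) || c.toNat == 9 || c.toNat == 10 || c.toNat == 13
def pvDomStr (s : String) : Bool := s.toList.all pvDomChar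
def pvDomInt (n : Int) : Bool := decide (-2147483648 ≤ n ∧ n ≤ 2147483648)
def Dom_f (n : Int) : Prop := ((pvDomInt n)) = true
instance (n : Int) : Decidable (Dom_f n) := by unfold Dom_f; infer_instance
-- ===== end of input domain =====

-- B replaces A's recursion by a single iterative pass over the depths (opening lines
-- ascending, base-case lines, closing lines descending), computing each indentation once.

-- ===== PORT A =====
-- A recurses on n-1 until 0; Pre_f restricts to 0 ≤ n (negative n never terminates in
-- Python), so the recursion is transliterated as structural recursion on n.toNat.
def fRecA : Nat → List String
  | 0 =>
      ["\"재귀함수가 뭔가요?\"",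
       "\"재귀함수는 자기 자신을 호출하는 함수라네\"",
       "라고 답변하였지."]
  | Nat.succ k =>
      let ans := ["\"재귀함수가 뭔가요?\"",
                  "\"잘 들어보게. 옛날옛날 한 산 꼭대기에 이세상 모든 지식을 통달한 선인이 있었어.",
                  "마을 사람들은 모두 그 선인에게 수많은 질문을 했고, 모두 지혜롭게 대답해 주었지.",
                  "그의 답은 대부분 옳았다고 하네. 그런데 어느 날, 그 선인에게 한 선비가 찾아와서 물었어.\""]
      let inner := fRecA k
      -- for s in inner_sentence: ans.append('____' + s)
      (inner.foldl (fun a s => a ++ ["____" ++ s]) ans) ++ ["라고 답변하였지."]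

def f (n : Int) : List String := fRecA n.toNat

-- ===== PORT B =====
-- hand port of Python's '____' * d (empty for d ≤ 0); exact on integers
def pvPad (d : Int) : String := (List.replicate d.toNat "____").foldl (· ++ ·) ""

def f_alt (n : Int) : List String :=
  let q := "\"재귀함수가 뭔가요?\""
  let story := ["\"잘 들어보게. 옛날옛날 한 산 꼭대기에 이세상 모든 지식을 통달한 선인이 있었어.",
                "마을 사람들은 모두 그 선인에게 수많은 질문을 했고, 모두 지혜롭게 대답해 주었지.",
                "그의 답은 대부분 옳았다고 하네. 그런데 어느 날, 그 선인에게 한 선비가 찾아와서 물었어.\""]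
  let base := "\"재귀함수는 자기 자신을 호출하는 함수라네\""
  let closing := "라고 답변하였지."
  let out := (PySem.List.pyRange 0 n 1).foldl (fun out d =>
      let pad := pvPad d
      story.foldl (fun o s => o ++ [pad ++ s]) (out ++ [pad ++ q])) []
  let pad := pvPad n
  let out := out ++ [pad ++ q, pad ++ base, pad ++ closing]
  (PySem.List.pyRange (n - 1) (-1) (-1)).foldl (fun o d => o ++ [pvPad d ++ closing]) out

-- ===== PRECONDITION & SPEC =====
-- Pre_f excludes negative n, on which Python's A recurses forever (RecursionError).
def Pre_f (n : Int) : Prop := 0 ≤ n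
instance (n : Int) : Decidable (Pre_f n) := by unfold Pre_f; infer_instance
def pvWitness_f : Int := (3)

def Spec_f (n : Int) (out : List String) : Prop := out = f_alt n
instance (n : Int) (out : List String) : Decidable (Spec_f n out) := by unfold Spec_f; infer_instance

-- ===== CLAIM (what is proved, stated in full; the proofs are below) =====
def Claim_equal_f : Prop := ∀ (n : Int), Dom_f n → Pre_f n → Spec_f n (f n)

-- ===== LEMMAS AND PROOFS =====
def jr : Nat → String
  | 0 => ""
  | k + 1 => "____" ++ jr k

def pvHeads (d : Nat) : List String :=
  [jr d ++ "\"재귀함수가 뭔가요?\"",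
   jr d ++ "\"잘 들어보게. 옛날옛날 한 산 꼭대기에 이세상 모든 지식을 통달한 선인이 있었어.",
   jr d ++ "마을 사람들은 모두 그 선인에게 수많은 질문을 했고, 모두 지혜롭게 대답해 주었지.",
   jr d ++ "그의 답은 대부분 옳았다고 하네. 그런데 어느 날, 그 선인에게 한 선비가 찾아와서 물었어.\""]

def pvOpens : Nat → Nat → List String
  | _, 0 => []
  | d, m + 1 => pvHeads d ++ pvOpens (d + 1) m

def pvCloses : Nat → Nat → List String
  | _, 0 => []
  | d, m + 1 => pvCloses (d + 1) m ++ [jr d ++ "라고 답변하였지."]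

def pvMid (d : Nat) : List String :=
  [jr d ++ "\"재귀함수가 뭔가요?\"",
   jr d ++ "\"재귀함수는 자기 자신을 호출하는 함수라네\"",
   jr d ++ "라고 답변하였지."]

theorem foldl_rep_append : ∀ (k : Nat) (a : String),
    (List.replicate k "____").foldl (· ++ ·) a = a ++ jr k := by
  intro k
  induction k with
  | zero => intro a; simp [jr]
  | succ k ih =>
      intro a
      simp only [List.replicate_succ, List.foldl_cons, ih, jr]
      rw [String.append_assoc]

theorem pad_eq (t : Int) : pvPad t = jr t.toNat := by
  simpa using foldl_rep_append t.toNat ""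

theorem jr_succ_right (d : Nat) : jr d ++ "____" = jr (d + 1) := by
  induction d with
  | zero => simp [jr]
  | succ d ih => simp only [jr, String.append_assoc, ih]

theorem foldl_app_singleton {α : Type} (g : α → String) :
    ∀ (l : List α) (init : List String),
      l.foldl (fun a s => a ++ [g s]) init = init ++ l.map g := by
  intro l
  induction l with
  | nil => intro init; simp
  | cons x xs ih => intro init; simp [List.foldl_cons, ih]

theorem fRecA_char : ∀ (m d : Nat),
    (fRecA m).map (fun s => jr d ++ s) =
      pvOpens d m ++ pvMid (d + m) ++ pvCloses d m := by
  intro m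
  induction m with
  | zero => intro d; simp [fRecA, pvOpens, pvCloses, pvMid]
  | succ m ih =>
      intro d
      have h1 : fRecA (m + 1) =
          ["\"재귀함수가 뭔가요?\"",
           "\"잘 들어보게. 옛날옛날 한 산 꼭대기에 이세상 모든 지식을 통달한 선인이 있었어.",
           "마을 사람들은 모두 그 선인에게 수많은 질문을 했고, 모두 지혜롭게 대답해 주었지.",
           "그의 답은 대부분 옳았다고 하네. 그런데 어느 날, 그 선인에게 한 선비가 찾아와서 물었어.\""]
          ++ (fRecA m).map (fun s => "____" ++ s) ++ ["라고 답변하였지."] := by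
        simp only [fRecA]
        rw [foldl_app_singleton]
      have h2 : ((fRecA m).map (fun s => "____" ++ s)).map (fun s => jr d ++ s)
          = (fRecA m).map (fun s => jr (d + 1) ++ s) := by
        rw [List.map_map]
        apply List.map_congr_left
        intro s _
        simp only [Function.comp]
        rw [← String.append_assoc, jr_succ_right]
      rw [h1]
      simp only [List.map_append, h2, ih (d + 1)]
      simp only [pvOpens, pvCloses, pvHeads, pvMid, List.map_cons, List.map_nil]
      have : d + 1 + m = d + (m + 1) := by omega
      rw [this]
      simp [List.append_assoc]

theorem fRecA_eq (m : Nat) :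
    fRecA m = pvOpens 0 m ++ pvMid m ++ pvCloses 0 m := by
  have h := fRecA_char m 0
  simp only [jr, Nat.zero_add] at h
  simpa using h

theorem opens_succ_right (m : Nat) : ∀ d, pvOpens d (m + 1) = pvOpens d m ++ pvHeads (d + m) := by
  induction m with
  | zero => intro d; simp [pvOpens]
  | succ m ih =>
      intro d
      show pvHeads d ++ pvOpens (d + 1) (m + 1) = pvOpens d (m + 1) ++ pvHeads (d + (m + 1))
      rw [ih (d + 1)]
      show pvHeads d ++ (pvOpens (d + 1) m ++ pvHeads (d + 1 + m)) = (pvHeads d ++ pvOpens (d + 1) m) ++ pvHeads (d + (m + 1))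
      have : d + 1 + m = d + (m + 1) := by omega
      rw [this, List.append_assoc]

theorem closes_desc (m : Nat) : ∀ d,
    (List.range m).map (fun k => jr (d + m - 1 - k) ++ "라고 답변하였지.") = pvCloses d m := by
  induction m with
  | zero => intro d; simp [pvCloses]
  | succ m ih =>
      intro d
      rw [List.range_succ, List.map_append]
      show (List.range m).map (fun k => jr (d + (m + 1) - 1 - k) ++ "라고 답변하였지.") ++ [jr (d + (m + 1) - 1 - m) ++ "라고 답변하였지."] = pvCloses (d + 1) m ++ [jr d ++ "라고 답변하였지."]
      have h1 : (fun k => jr (d + (m + 1) - 1 - k) ++ "라고 답변하였지.")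
              = (fun k => jr (d + 1 + m - 1 - k) ++ "라고 답변하였지.") := by
        funext k; congr 2; omega
      have h2 : d + (m + 1) - 1 - m = d := by omega
      rw [h1, ih (d + 1), h2]

theorem fold_opens (m : Nat) :
    (List.range m).foldl (fun out k => out ++ pvHeads k) [] = pvOpens 0 m := by
  induction m with
  | zero => simp [pvOpens]
  | succ m ih =>
      rw [List.range_succ, List.foldl_append, ih, List.foldl_cons, List.foldl_nil,
          opens_succ_right]
      simp

theorem pad_natCast (k : Nat) : pvPad ((k : Int)) = jr k := by
  rw [pad_eq]; norm_num

theorem pad_desc (m k : Nat) : pvPad ((m : Int) - 1 - (k : Int)) = jr (m - 1 - k) := by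
  rw [pad_eq]
  congr 1
  omega

theorem f_alt_eq (m : Nat) :
    f_alt (m : Int) = pvOpens 0 m ++ pvMid m ++ pvCloses 0 m := by
  simp only [f_alt]
  rw [PySem.List.pyRange_one, PySem.List.pyRange_neg_one]
  have ht1 : (((m : Int)) - 0).toNat = m := by omega
  have ht2 : (((m : Int) - 1) - (-1)).toNat = m := by omega
  rw [ht1, ht2]
  simp only [List.foldl_map]
  have hopen : (List.range m).foldl
      (fun (out : List String) (k : Nat) =>
        (["\"잘 들어보게. 옛날옛날 한 산 꼭대기에 이세상 모든 지식을 통달한 선인이 있었어.",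
          "마을 사람들은 모두 그 선인에게 수많은 질문을 했고, 모두 지혜롭게 대답해 주었지.",
          "그의 답은 대부분 옳았다고 하네. 그런데 어느 날, 그 선인에게 한 선비가 찾아와서 물었어.\""]).foldl
          (fun o s => o ++ [pvPad (0 + (k : Int)) ++ s])
          (out ++ [pvPad (0 + (k : Int)) ++ "\"재귀함수가 뭔가요?\""]))
      [] = pvOpens 0 m := by
    rw [← fold_opens m]
    apply List.foldl_ext
    intro acc k _
    simp [pad_natCast, pvHeads, List.append_assoc]
  rw [hopen]
  have hclose : ∀ (init : List String), (List.range m).foldl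
      (fun (o : List String) (k : Nat) => o ++ [pvPad ((m : Int) - 1 - (k : Int)) ++ "라고 답변하였지."]) init
      = init ++ pvCloses 0 m := by
    intro init
    have hf : (List.range m).foldl
        (fun (o : List String) (k : Nat) => o ++ [pvPad ((m : Int) - 1 - (k : Int)) ++ "라고 답변하였지."]) init
        = (List.range m).foldl
        (fun (o : List String) (k : Nat) => o ++ [jr (0 + m - 1 - k) ++ "라고 답변하였지."]) init := by
      apply List.foldl_ext
      intro acc k _
      rw [pad_desc]
      norm_num
    rw [hf, foldl_app_singleton (fun k => jr (0 + m - 1 - k) ++ "라고 답변하였지."), closes_desc m 0]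
  rw [hclose]
  have hm : pvPad (m : Int) = jr m := by rw [pad_eq]; norm_num
  rw [hm]
  simp [pvMid, List.append_assoc]

-- ===== VERDICT (by name: the statement is the Claim_ definition above) =====
theorem f_spec : Claim_equal_f := by
  intro n _ hpre
  unfold Spec_f f
  have hn : ((n.toNat : Int)) = n := Int.toNat_of_nonneg hpre
  rw [← hn, f_alt_eq, fRecA_eq, Int.toNat_natCast]
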